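-- pv_equiv track=rewrite | github.com/Frosselet/pdf-ocr | src/docpact/filter.py | _concatenate_title_groups
-- ===== SOURCE A (Python) =====
-- def _concatenate_title_groups(
--     headings: list[tuple[int, str]],
--     max_gap: int = 3,
-- ) -> list[str]:
--     """Group consecutive headings and concatenate them.
--
--     Handles multi-line titles like:
--     - "NEW CAR REGISTRATIONS BY MARKET AND POWER SOURCE"
--     - "MONTHLY"
--     Which should become one title: "NEW CAR REGISTRATIONS BY MARKET AND POWER SOURCE MONTHLY"
--
--     Args:
--         headings: List of (row_index, text) from _extract_titles_from_page.
--         max_gap: Maximum row gap to consider headings as part of same group.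
--
--     Returns:
--         List of concatenated title strings.
--     """
--     if not headings:
--         return []
--
--     groups: list[list[str]] = []
--     current_group: list[str] = [headings[0][1]]
--     last_row = headings[0][0]
--
--     for row_idx, text in headings[1:]:
--         if row_idx - last_row <= max_gap:
--             current_group.append(text)
--         else:
--             groups.append(current_group)
--             current_group = [text]
--         last_row = row_idx
--
--     groups.append(current_group)
--
--     return [" ".join(group) for group in groups]
-- ===== SOURCE B (Python) =====
-- def _concatenate_title_groups(
--     headings: list[tuple[int, str]],
--     max_gap: int = 3,
-- ) -> list[str]:
--     # Walk the headings back-to-front, building the output strings directly: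
--     # a heading whose successor is within max_gap rows is prepended (with a
--     # space) onto the title being built at the front of the output; otherwise
--     # it starts a new title. No group lists, no final join pass.
--     out: list[str] = []
--     next_row = None
--     for row, text in reversed(headings):
--         if next_row is not None and next_row - row <= max_gap:
--             out[0] = text + " " + out[0]
--         else:
--             out.insert(0, text)
--         next_row = row
--     return out
-- ===== Notes on version B (the rewrite author's own statement) =====
-- stated objective: alternative
-- what changed: B traverses the headings in reverse and builds the output title strings directly back-to-front (prepending 'text + space' onto the title under construction, or inserting a new one), eliminating A's list-of-group-lists accumulator and the final ' '.join mapping pass.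
import Mathlib
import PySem

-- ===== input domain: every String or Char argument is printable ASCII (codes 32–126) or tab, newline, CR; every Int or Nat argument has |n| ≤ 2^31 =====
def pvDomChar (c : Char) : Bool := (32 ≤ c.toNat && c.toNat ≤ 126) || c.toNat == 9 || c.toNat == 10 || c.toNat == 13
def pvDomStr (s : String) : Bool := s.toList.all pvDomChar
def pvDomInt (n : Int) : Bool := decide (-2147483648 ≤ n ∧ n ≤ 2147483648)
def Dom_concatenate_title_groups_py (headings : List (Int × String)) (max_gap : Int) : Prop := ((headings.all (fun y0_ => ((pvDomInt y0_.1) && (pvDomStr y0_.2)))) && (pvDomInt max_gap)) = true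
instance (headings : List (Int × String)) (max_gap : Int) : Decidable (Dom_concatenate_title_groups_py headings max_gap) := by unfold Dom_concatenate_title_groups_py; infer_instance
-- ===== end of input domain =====

-- B walks the headings in reverse and builds each title string directly (no
-- group lists, no final join pass); same return value as A, proved below.

-- ===== PORT A =====
-- A's loop state: (groups, current_group, last_row); one step of the for loop.
def aStep (max_gap : Int) (s : List (List String) × List String × Int)
    (rt : Int × String) : List (List String) × List String × Int :=
  if rt.1 - s.2.2 ≤ max_gap then (s.1, s.2.1 ++ [rt.2], rt.1)
  else (s.1 ++ [s.2.1], [rt.2], rt.1)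

def concatenate_title_groups_py (headings : List (Int × String)) (max_gap : Int) : List String :=
  match headings with
  | [] => []                                         -- if not headings: return []
  | (r0, t0) :: rest =>                              -- headings[0], headings[1:]
    let st := rest.foldl (aStep max_gap) ([], [t0], r0)
    let groups := st.1 ++ [st.2.1]                   -- groups.append(current_group)
    groups.map (fun g => PySem.Str.join " " g)       -- [" ".join(group) for group in groups]

-- ===== PORT B =====
-- B's loop state: (out, next_row); one step of the loop over reversed(headings).
-- `out[0] = text + " " + out[0]` is only reached with next_row set, when out is
-- nonempty; the [] branch of that match is unreachable.
def bStep (max_gap : Int) (s : List String × Option Int)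
    (rt : Int × String) : List String × Option Int :=
  match s.2 with
  | some nr =>
    if nr - rt.1 ≤ max_gap then
      (match s.1 with
       | h :: tl => (rt.2 ++ " " ++ h) :: tl         -- out[0] = text + " " + out[0]
       | [] => [], some rt.1)
    else (rt.2 :: s.1, some rt.1)                    -- out.insert(0, text)
  | none => (rt.2 :: s.1, some rt.1)                 -- out.insert(0, text)

def concatenate_title_groups_py_alt (headings : List (Int × String)) (max_gap : Int) : List String :=
  (headings.reverse.foldl (bStep max_gap) ([], none)).1

-- ===== PRECONDITION & SPEC =====
def Spec_concatenate_title_groups_py (headings : List (Int × String)) (max_gap : Int) (out : List String) : Prop := out = concatenate_title_groups_py_alt headings max_gap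
instance (headings : List (Int × String)) (max_gap : Int) (out : List String) : Decidable (Spec_concatenate_title_groups_py headings max_gap out) := by unfold Spec_concatenate_title_groups_py; infer_instance

-- ===== CLAIM (what is proved, stated in full; the proofs are below) =====
def Claim_equal_concatenate_title_groups_py : Prop := ∀ (headings : List (Int × String)) (max_gap : Int), Dom_concatenate_title_groups_py headings max_gap → Spec_concatenate_title_groups_py headings max_gap (concatenate_title_groups_py headings max_gap)

-- ===== LEMMAS AND PROOFS =====

-- Common recursive characterisation of B (grouping decided by adjacent rows).
def bSpec (g : Int) : List (Int × String) → List String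
  | [] => []
  | (r, t) :: tl =>
    match tl, bSpec g tl with
    | (r2, _) :: _, h :: rest =>
      if r2 - r ≤ g then (t ++ " " ++ h) :: rest else t :: h :: rest
    | _, _ => [t]

theorem bSpec_nil (g : Int) : bSpec g [] = [] := rfl

theorem bSpec_single (g r : Int) (t : String) : bSpec g [(r, t)] = [t] := rfl

theorem bSpec_cons_cons (g r r2 : Int) (t t2 : String) (tl : List (Int × String))
    (h : String) (rest : List String) (hb : bSpec g ((r2, t2) :: tl) = h :: rest) :
    bSpec g ((r, t) :: (r2, t2) :: tl) =
      if r2 - r ≤ g then (t ++ " " ++ h) :: rest else t :: h :: rest := by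
  have e : bSpec g ((r, t) :: (r2, t2) :: tl) =
      (match (r2, t2) :: tl, bSpec g ((r2, t2) :: tl) with
       | (r2', _) :: _, h :: rest =>
         if r2' - r ≤ g then (t ++ " " ++ h) :: rest else t :: h :: rest
       | _, _ => [t]) := rfl
  rw [e, hb]

theorem bSpec_cons_ne_nil (g : Int) : ∀ (r : Int) (t : String) (tl : List (Int × String)),
    bSpec g ((r, t) :: tl) ≠ [] := by
  intro r t tl
  induction tl generalizing r t with
  | nil => simp [bSpec_single]
  | cons q tl' ih =>
    obtain ⟨r2, t2⟩ := q
    rcases hb : bSpec g ((r2, t2) :: tl') with _ | ⟨h, rest⟩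
    · exact absurd hb (ih r2 t2)
    · rw [bSpec_cons_cons g r r2 t t2 tl' h rest hb]
      split <;> simp

theorem bFold_eq_bSpec (g : Int) (l : List (Int × String)) :
    l.reverse.foldl (bStep g) ([], none) =
      (bSpec g l, l.head?.map Prod.fst) := by
  induction l with
  | nil => simp [bSpec_nil]
  | cons p tl ih =>
    obtain ⟨r, t⟩ := p
    rw [List.reverse_cons, List.foldl_append, ih]
    cases tl with
    | nil => simp [bStep, bSpec_single, bSpec_nil]
    | cons q tl' =>
      obtain ⟨r2, t2⟩ := q
      rcases hb : bSpec g ((r2, t2) :: tl') with _ | ⟨h, rest⟩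
      · exact absurd hb (bSpec_cons_ne_nil g r2 t2 tl')
      · rw [bSpec_cons_cons g r r2 t t2 tl' h rest hb]
        simp only [List.head?, Option.map, bStep, List.foldl_cons, List.foldl_nil]
        by_cases hc : r2 - r ≤ g <;> simp [hc]

-- A's groups accumulator is a pure prefix of the result.
theorem aFold_groups (g : Int) (l : List (Int × String)) (gs : List (List String))
    (cur : List String) (last : Int) :
    l.foldl (aStep g) (gs, cur, last) =
      (gs ++ (l.foldl (aStep g) ([], cur, last)).1,
       (l.foldl (aStep g) ([], cur, last)).2) := by
  induction l generalizing gs cur last with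
  | nil => simp
  | cons p tl ih =>
    obtain ⟨r, t⟩ := p
    by_cases hc : r - last ≤ g
    · simp only [List.foldl_cons, aStep, hc, if_pos]
      exact ih gs (cur ++ [t]) r
    · simp only [List.foldl_cons, aStep, hc, if_neg, not_false_iff, List.nil_append]
      rw [ih (gs ++ [cur]) [t] r, ih [cur] [t] r]
      simp

-- " ".join lemmas, proved at the List Char level and bridged through toList.
theorem chars_join_append (sep : List Char) (l : List (List Char)) (x : List Char)
    (h : l ≠ []) :
    PySem.Chars.join sep (l ++ [x]) = PySem.Chars.join sep l ++ sep ++ x := by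
  induction l with
  | nil => exact absurd rfl h
  | cons a l' ih =>
    cases l' with
    | nil => simp [PySem.Chars.join_singleton, PySem.Chars.join_cons_cons]
    | cons b l'' =>
      rw [List.cons_append, List.cons_append, PySem.Chars.join_cons_cons,
        PySem.Chars.join_cons_cons, ← List.cons_append, ih (by simp)]
      simp [List.append_assoc]

theorem join_append_singleton (cur : List String) (t : String) (h : cur ≠ []) :
    PySem.Str.join " " (cur ++ [t]) = PySem.Str.join " " cur ++ " " ++ t := by
  apply String.toList_inj.mp
  simp only [PySem.Str.toList_join, String.toList_append, List.map_append, List.map_cons,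
    List.map_nil]
  exact chars_join_append " ".toList (cur.map String.toList) t.toList (by simpa using h)

theorem join_single (t : String) : PySem.Str.join " " [t] = t := by
  apply String.toList_inj.mp
  simp [PySem.Str.toList_join, PySem.Chars.join_singleton]

def specAux (g : Int) : Int → String → List (Int × String) → List String
  | _, acc, [] => [acc]
  | last, acc, (r, t) :: tl =>
    if r - last ≤ g then specAux g r (acc ++ " " ++ t) tl
    else acc :: specAux g r t tl

theorem aFold_eq_specAux (g : Int) (l : List (Int × String)) (cur : List String)
    (last : Int) (h : cur ≠ []) :
    ((l.foldl (aStep g) ([], cur, last)).1 ++ [(l.foldl (aStep g) ([], cur, last)).2.1]).map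
        (fun gr => PySem.Str.join " " gr) =
      specAux g last (PySem.Str.join " " cur) l := by
  induction l generalizing cur last with
  | nil => simp [specAux]
  | cons p tl ih =>
    obtain ⟨r, t⟩ := p
    by_cases hc : r - last ≤ g
    · simp only [List.foldl_cons, aStep, hc, if_pos, specAux]
      rw [← join_append_singleton cur t h]
      exact ih (cur ++ [t]) r (by simp)
    · simp only [List.foldl_cons, aStep, hc, if_neg, not_false_iff, List.nil_append, specAux]
      rw [aFold_groups g tl [cur] [t] r]
      simp only [List.cons_append, List.nil_append, List.map_cons]
      rw [ih [t] r (by simp), join_single]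

theorem specAux_eq_bSpec (g : Int) (l : List (Int × String)) (last : Int) (acc : String) :
    specAux g last acc l = bSpec g ((last, acc) :: l) := by
  induction l generalizing last acc with
  | nil => simp [specAux, bSpec_single]
  | cons p tl ih =>
    obtain ⟨r, t⟩ := p
    rcases hb : bSpec g ((r, t) :: tl) with _ | ⟨h, rest⟩
    · exact absurd hb (bSpec_cons_ne_nil g r t tl)
    · rw [bSpec_cons_cons g last r acc t tl h rest hb]
      simp only [specAux]
      by_cases hc : r - last ≤ g
      · simp only [hc, if_pos]
        rw [ih]
        cases tl with
        | nil =>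
          rw [bSpec_single] at hb
          obtain ⟨rfl, rfl⟩ : t = h ∧ ([] : List String) = rest := by
            simpa using hb
          exact bSpec_single g r (acc ++ " " ++ t)
        | cons q tl' =>
          obtain ⟨r2, t2⟩ := q
          rcases hb2 : bSpec g ((r2, t2) :: tl') with _ | ⟨h2, rest2⟩
          · exact absurd hb2 (bSpec_cons_ne_nil g r2 t2 tl')
          · rw [bSpec_cons_cons g r r2 (acc ++ " " ++ t) t2 tl' h2 rest2 hb2]
            rw [bSpec_cons_cons g r r2 t t2 tl' h2 rest2 hb2] at hb
            by_cases hc2 : r2 - r ≤ g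
            · simp only [hc2, if_pos] at hb ⊢
              obtain ⟨rfl, rfl⟩ : t ++ " " ++ h2 = h ∧ rest2 = rest := by
                simpa using hb
              simp [String.append_assoc]
            · simp only [hc2, if_neg, not_false_iff] at hb ⊢
              obtain ⟨rfl, rfl⟩ : t = h ∧ h2 :: rest2 = rest := by
                simpa using hb
              rfl
      · simp only [hc, if_neg, not_false_iff]
        rw [ih, hb]

-- ===== VERDICT (by name: the statement is the Claim_ definition above) =====
theorem concatenate_title_groups_py_spec : Claim_equal_concatenate_title_groups_py := by
  intro headings max_gap _
  unfold Spec_concatenate_title_groups_py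
  unfold concatenate_title_groups_py concatenate_title_groups_py_alt
  cases headings with
  | nil => simp
  | cons p rest =>
    obtain ⟨r0, t0⟩ := p
    rw [bFold_eq_bSpec]
    simp only
    rw [aFold_eq_specAux max_gap rest [t0] r0 (by simp), join_single,
      specAux_eq_bSpec]
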